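-- pv_equiv track=rewrite | github.com/CalderWhite/LightCycles | Racers/SpaceHunter.py | findSpace
-- ===== SOURCE A (Python) =====
-- def findSpace(Map):
--     numRows = len(Map)
--     numCols = len(Map[0])
--     maxRow = 50 # default center
--     maxCol = 50
--     count = 0
--
--     for i in range(numRows):
--         empty = Map[i].count(0)
--         if empty > count:
--             maxRow = i
--             count = empty
--
--     count = 0
--     for i in range(numCols):
--         col = [r[i] for r in Map]
--         empty = col.count(0)
--         if empty > count:
--             maxCol = i
--             count = empty
--
--     return maxRow, maxCol
-- ===== SOURCE B (Python) =====
-- def _best(counts):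
--     # earliest index whose count strictly exceeds the running best (start 0); 50 if none does
--     best_i, best = 50, 0
--     for i, c in enumerate(counts):
--         if c > best:
--             best_i, best = i, c
--     return best_i
--
--
-- def findSpace(Map):
--     numCols = len(Map[0])
--     row_zeros = []
--     col_zeros = [0] * numCols
--     for row in Map:
--         row_zeros.append(sum(1 for v in row if v == 0))
--         col_zeros = [c + (1 if row[j] == 0 else 0) for j, c in enumerate(col_zeros)]
--     return _best(row_zeros), _best(col_zeros)
-- ===== Notes on version B (the rewrite author's own statement) =====
-- stated objective: alternative
-- what changed: One pass over the rows builds the per-row and per-column zero-count vectors (columns via an indexed bump of a running count vector, never materializing a column), then a shared strict-greater argmax helper picks both indices, instead of A's two loops that re-scan the map and build each column as a fresh list.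
import Mathlib
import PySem

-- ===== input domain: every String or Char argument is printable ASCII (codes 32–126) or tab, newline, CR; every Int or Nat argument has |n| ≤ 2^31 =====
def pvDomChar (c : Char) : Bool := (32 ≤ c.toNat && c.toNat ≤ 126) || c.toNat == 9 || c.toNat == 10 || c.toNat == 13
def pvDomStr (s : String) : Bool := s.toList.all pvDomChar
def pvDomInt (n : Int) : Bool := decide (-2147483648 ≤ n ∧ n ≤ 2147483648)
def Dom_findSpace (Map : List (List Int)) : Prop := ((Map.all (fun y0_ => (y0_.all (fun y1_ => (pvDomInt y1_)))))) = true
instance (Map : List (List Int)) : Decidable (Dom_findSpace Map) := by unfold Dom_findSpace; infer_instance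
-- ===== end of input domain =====

-- B replaces A's two rescanning loops by one pass building both zero-count vectors plus a shared
-- strict-greater argmax helper ('alternative'; same asymptotic cost). The pyGetD in B's column
-- bump is exact inside Pre_ (indices are in range there; out of range both Pythons raise IndexError).

-- ===== PORT A =====
def findSpace (Map : List (List Int)) : Int × Int :=
  let numRows : Int := PySem.List.len Map
  let numCols : Int := PySem.List.len (PySem.List.pyGetD Map 0 [])
  let s1 := (PySem.List.pyRange 0 numRows 1).foldl (fun (st : Int × Int) i =>
      let empty : Int := (PySem.List.count (PySem.List.pyGetD Map i []) 0 : Int)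
      if empty > st.2 then (i, empty) else st) (50, 0)
  let s2 := (PySem.List.pyRange 0 numCols 1).foldl (fun (st : Int × Int) i =>
      let col : List Int := Map.map (fun r => PySem.List.pyGetD r i 0)
      let empty : Int := (PySem.List.count col 0 : Int)
      if empty > st.2 then (i, empty) else st) (50, 0)
  (s1.1, s2.1)

-- ===== PORT B =====
def bestIdx (counts : List Int) : Int :=
  ((PySem.List.enumerate counts 0).foldl (fun (st : Int × Int) p =>
      if p.2 > st.2 then (p.1, p.2) else st) (50, 0)).1

def findSpace_alt (Map : List (List Int)) : Int × Int :=
  let numCols : Nat := (PySem.List.pyGetD Map 0 []).length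
  let st := Map.foldl (fun (st : List Int × List Int) row =>
      (st.1 ++ [row.foldl (fun s v => if v == 0 then s + 1 else s) (0 : Int)],
       (PySem.List.enumerate st.2 0).map (fun p =>
         if PySem.List.pyGetD row p.1 0 == 0 then p.2 + 1 else p.2)))
    ([], List.replicate numCols (0 : Int))
  (bestIdx st.1, bestIdx st.2)

-- ===== PRECONDITION & SPEC =====
-- Pre_ excludes exactly the inputs where the Pythons raise IndexError: the empty map (Map[0]) and
-- maps with a row shorter than the first row (r[i] / row[j] indexing) — both A and B raise there.
def Pre_findSpace (Map : List (List Int)) : Prop :=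
  Map ≠ [] ∧ ∀ r ∈ Map, (Map.headD []).length ≤ r.length
instance (Map : List (List Int)) : Decidable (Pre_findSpace Map) := by unfold Pre_findSpace; infer_instance
def pvWitness_findSpace : List (List Int) := [[0, 1], [1, 0]]

def Spec_findSpace (Map : List (List Int)) (out : Int × Int) : Prop := out = findSpace_alt Map
instance (Map : List (List Int)) (out : Int × Int) : Decidable (Spec_findSpace Map out) := by unfold Spec_findSpace; infer_instance

-- ===== CLAIM (what is proved, stated in full; the proofs are below) =====
def Claim_equal_findSpace : Prop := ∀ (Map : List (List Int)), Dom_findSpace Map → Pre_findSpace Map → Spec_findSpace Map (findSpace Map)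

-- ===== LEMMAS AND PROOFS =====

-- B's per-row fold is the zero count of the row.
theorem rowFold_eq_count (row : List Int) :
    row.foldl (fun s v => if v == 0 then s + 1 else s) (0 : Int) = (row.count 0 : Int) := by
  simpa using PySem.List.foldl_beq_add_one row (0 : Int) (0 : Int)

-- B's column accumulator: folding the indexed bump over the rows.
theorem colFold_char (Map : List (List Int)) : ∀ (acc : List Int),
    (∀ r ∈ Map, acc.length ≤ r.length) →
    Map.foldl (fun (a : List Int) row => (PySem.List.enumerate a 0).map (fun p =>
        if PySem.List.pyGetD row p.1 0 == 0 then p.2 + 1 else p.2)) acc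
      = (List.range acc.length).map (fun k => acc.getD k 0 + (Map.countP (fun r => r.getD k 0 == 0) : Int)) := by
  induction Map with
  | nil =>
      intro acc _
      simp only [List.foldl_nil, List.countP_nil, Nat.cast_zero, add_zero]
      refine (List.ext_getElem (by simp) ?_).symm
      intro k hk _
      simp only [List.getElem_map, List.getElem_range]
      rw [List.getD_eq_getElem]
  | cons r t ih =>
      intro acc hlen
      have hr : acc.length ≤ r.length := hlen r (by simp)
      have hz : ((PySem.List.enumerate acc 0).map (fun p =>
          if PySem.List.pyGetD r p.1 0 == 0 then p.2 + 1 else p.2)).length = acc.length := by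
        simp [PySem.List.length_enumerate]
      rw [List.foldl_cons, ih _ (by intro q hq; rw [hz]; exact hlen q (by simp [hq]))]
      rw [hz]
      refine List.map_congr_left ?_
      intro k hk
      rw [List.mem_range] at hk
      have hkr : k < r.length := lt_of_lt_of_le hk hr
      rw [List.getD_eq_getElem _ _ (by rw [hz]; exact hk)]
      rw [List.getElem_map, PySem.List.getElem_enumerate]
      simp only [zero_add, List.countP_cons]
      rw [PySem.List.pyGetD_natCast]
      have hrk : r.getD k 0 = r[k] := List.getD_eq_getElem _ _ hkr
      have hak : acc.getD k 0 = acc[k] := List.getD_eq_getElem _ _ hk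
      simp only [hrk, hak]
      by_cases h0 : r[k] = 0
      · simp [h0]
        ring
      · simp [h0]

-- A's index-driven selection loop equals bestIdx of the value table.
theorem bestIdx_eq_loop (v : List Int) (n : Nat)
    (f : Int → Int) (hf : ∀ k : Nat, k < n → f (k : Int) = v.getD k 0) (hn : v.length = n) :
    bestIdx v = ((PySem.List.pyRange 0 (n : Int) 1).foldl (fun (st : Int × Int) i =>
      if f i > st.2 then (i, f i) else st) (50, 0)).1 := by
  unfold bestIdx
  rw [PySem.List.enumerate_eq_map_pyRange (d := 0), List.foldl_map]
  subst hn
  simp only [PySem.List.len_eq]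
  apply congrArg Prod.fst
  apply PySem.List.foldl_congr_mem
  intro acc x hx
  dsimp only
  rw [PySem.List.mem_pyRange_one] at hx
  obtain ⟨hx0, hx1⟩ := hx
  have hk : x.toNat < v.length := by simpa using (Int.toNat_lt' (by omega)).mpr (by omega)
  have hxn : x = ((x.toNat : Nat) : Int) := by omega
  rw [hxn, hf x.toNat hk, PySem.List.pyGetD_natCast]

theorem findSpace_eq (Map : List (List Int)) (hpre : Pre_findSpace Map) :
    findSpace Map = findSpace_alt Map := by
  obtain ⟨hne, hlen⟩ := hpre
  obtain ⟨r0, t, rfl⟩ := List.exists_cons_of_ne_nil hne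
  simp only [List.headD_cons] at hlen
  unfold findSpace findSpace_alt
  simp only [PySem.List.len_eq, PySem.List.pyGetD_zero_cons]
  -- name the two count tables B builds
  have hsplit : (r0 :: t).foldl (fun (st : List Int × List Int) row =>
      (st.1 ++ [row.foldl (fun s v => if v == 0 then s + 1 else s) (0 : Int)],
       (PySem.List.enumerate st.2 0).map (fun p =>
         if PySem.List.pyGetD row p.1 0 == 0 then p.2 + 1 else p.2)))
      ([], List.replicate r0.length (0 : Int))
      = ((r0 :: t).map (fun row => (row.count 0 : Int)),
         (r0 :: t).foldl (fun (a : List Int) row => (PySem.List.enumerate a 0).map (fun p =>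
             if PySem.List.pyGetD row p.1 0 == 0 then p.2 + 1 else p.2))
           (List.replicate r0.length (0 : Int))) := by
    have h1 := PySem.List.foldl_prod_mk
        (fun (a : List Int) (row : List Int) => a ++ [row.foldl (fun s v => if v == 0 then s + 1 else s) (0 : Int)])
        (fun (a : List Int) (row : List Int) => (PySem.List.enumerate a 0).map (fun p =>
            if PySem.List.pyGetD row p.1 0 == 0 then p.2 + 1 else p.2))
        (r0 :: t) [] (List.replicate r0.length (0 : Int))
    refine h1.trans ?_
    refine congrArg₂ Prod.mk ?_ rfl
    refine Eq.trans (PySem.List.foldl_congr_mem (r0 :: t)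
        (fun (a : List Int) (row : List Int) => a ++ [row.foldl (fun s v => if v == 0 then s + 1 else s) (0 : Int)])
        (fun (a : List Int) (row : List Int) => a ++ [((row.count 0 : Nat) : Int)])
        [] ?_) ?_
    · intro a row _
      dsimp only
      rw [rowFold_eq_count]
    · simpa using PySem.List.foldl_append_singleton_eq_map
        (l := r0 :: t) (f := fun (row : List Int) => ((row.count 0 : Nat) : Int)) (acc := [])
  rw [hsplit]
  have hcz := colFold_char (r0 :: t) (List.replicate r0.length (0 : Int)) (by simpa using hlen)
  simp only [List.length_replicate] at hcz
  refine congrArg₂ Prod.mk ?_ ?_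
  · -- rows
    rw [bestIdx_eq_loop ((r0 :: t).map (fun row => ((row.count 0 : Int)))) (r0 :: t).length
        (fun i => ((PySem.List.count (PySem.List.pyGetD (r0 :: t) i []) 0 : Nat) : Int)) ?_ (by simp)]
    intro k hk
    dsimp only
    rw [PySem.List.pyGetD_natCast, List.getD_eq_getElem _ _ hk,
      List.getD_eq_getElem _ _ (by simpa using hk :
        k < ((r0 :: t).map (fun row => ((row.count 0 : Nat) : Int))).length), List.getElem_map]
    simp [PySem.List.count_eq]
  · -- cols
    rw [bestIdx_eq_loop _ r0.length
        (fun i => ((PySem.List.count ((r0 :: t).map (fun r => PySem.List.pyGetD r i 0)) 0 : Nat) : Int)) ?_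
        (by rw [hcz]; simp)]
    intro k hk
    dsimp only
    rw [hcz,
      List.getD_eq_getElem _ _ (by simpa using hk :
        k < ((List.range r0.length).map (fun j => (List.replicate r0.length (0 : Int)).getD j 0 + ((r0 :: t).countP (fun r => r.getD j 0 == 0) : Int))).length),
      List.getElem_map, List.getElem_range]
    rw [List.getD_eq_getElem _ _ (by simpa using hk), List.getElem_replicate, zero_add]
    rw [PySem.List.count_eq, List.count_eq_countP, List.countP_map]
    refine congrArg Nat.cast (List.countP_congr ?_)
    intro r hr
    dsimp only [Function.comp]
    rw [PySem.List.pyGetD_natCast]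

-- ===== VERDICT (by name: the statement is the Claim_ definition above) =====
theorem findSpace_spec : Claim_equal_findSpace := by
  intro Map _ hpre
  unfold Spec_findSpace
  exact findSpace_eq Map hpre
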